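-- pv_equiv track=rewrite | github.com/Chemokoren/Algorithms-1 | AlgoMonster/Company-Specific OAs/Microsoft OA/max_inserts_to_obtain_string_without_3_consecutive_a.py | max_inserts
-- ===== SOURCE A (Python) =====
-- from itertools import groupby
--
-- def max_inserts(s: str) -> int:
--     ans, last =0, '#'
--     for c, g in groupby(s):
--         L = len(list(g))
--         if c == 'a':
--             if L < 3:
--                 ans += 2 - L
--             else:
--                 return -1
--         else:
--             ans += 2 * (L - (last == 'a'))
--         last = c
--     ans += 2 * (s[-1] != 'a')
--     return ans
-- ===== SOURCE B (Python) =====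
-- def max_inserts(s: str) -> int:
--     if 'aaa' in s:
--         return -1
--     return 2 * len(s) - 3 * s.count('a') + 2
-- ===== Notes on version B (the rewrite author's own statement) =====
-- stated objective: simpler
-- what changed: Replaces the groupby run-by-run accumulation with a single substring-containment test for a triple-a run plus a closed form computed from the total length and the count of letter a.
-- crash fix: On the empty string A raises IndexError at s[-1]; B returns 2. — e.g. on max_inserts(""): A raises IndexError, B returns 2
import Mathlib
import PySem

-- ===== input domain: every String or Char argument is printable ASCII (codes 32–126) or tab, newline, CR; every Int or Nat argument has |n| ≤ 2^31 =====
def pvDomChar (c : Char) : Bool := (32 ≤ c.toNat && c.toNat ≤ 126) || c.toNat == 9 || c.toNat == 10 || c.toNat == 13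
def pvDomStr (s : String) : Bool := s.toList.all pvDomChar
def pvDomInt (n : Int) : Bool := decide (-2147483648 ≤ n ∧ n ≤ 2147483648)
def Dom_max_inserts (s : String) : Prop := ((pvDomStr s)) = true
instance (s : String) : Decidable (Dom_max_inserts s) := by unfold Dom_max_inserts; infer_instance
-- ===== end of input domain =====

-- B replaces A's groupby run-scan with a closed form over the length and the letter-a count (or -1 when a triple-a run occurs); equivalence on nonempty strings.

-- ===== PORT A =====
-- itertools.groupby(s): run-length encoding, taking each run from the front (as groupby does)
def pvRuns : List Char → List (Char × Nat)
  | [] => []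
  | c :: cs =>
      (c, 1 + (cs.takeWhile (fun x => x == c)).length) :: pvRuns (cs.dropWhile (fun x => x == c))
termination_by l => l.length
decreasing_by
  simpa using Nat.lt_succ_of_le (List.length_dropWhile_le _ _)

-- the 'for c, g in groupby(s)' loop of A, with early 'return -1'; after the loop A adds 2*(s[-1] != 'a')
def pvLoopA (s : String) : List (Char × Nat) → Int → Char → Int
  | [], ans, _ => ans + 2 * (if ((PySem.Str.pyGet? s (-1)).getD 'a') ≠ 'a' then 1 else 0)
  | (c, L) :: gs, ans, last =>
      if c = 'a' then
        if (L : Int) < 3 then pvLoopA s gs (ans + (2 - (L : Int))) c else -1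
      else pvLoopA s gs (ans + 2 * ((L : Int) - (if last = 'a' then 1 else 0))) c

def max_inserts (s : String) : Int := pvLoopA s (pvRuns s.toList) 0 '#'

-- ===== PORT B =====
def max_inserts_alt (s : String) : Int :=
  if PySem.Str.isIn "aaa" s then -1
  else 2 * (PySem.Str.len s : Int) - 3 * (PySem.Str.count s "a" : Int) + 2

-- ===== PRECONDITION & SPEC =====
-- Pre_ excludes only the empty string, on which A raises IndexError at s[-1].
def Pre_max_inserts (s : String) : Prop := s ≠ ""
instance (s : String) : Decidable (Pre_max_inserts s) := by unfold Pre_max_inserts; infer_instance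
def pvWitness_max_inserts : String := "ab"

-- On the empty string A raises IndexError (s[-1]); B returns 2 (no characters, two inserts possible).
def Raises_max_inserts (s : String) : Prop := s = ""
instance (s : String) : Decidable (Raises_max_inserts s) := by unfold Raises_max_inserts; infer_instance
def pvRaiseWitness_max_inserts : String := ""
def pvRaiseWitnessOut_max_inserts : Int := 2

def Spec_max_inserts (s : String) (out : Int) : Prop := out = max_inserts_alt s
instance (s : String) (out : Int) : Decidable (Spec_max_inserts s out) := by unfold Spec_max_inserts; infer_instance

-- ===== CLAIM (what is proved, stated in full; the proofs are below) =====
def Claim_equal_max_inserts : Prop := ∀ (s : String), Dom_max_inserts s → Pre_max_inserts s → Spec_max_inserts s (max_inserts s)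
def Claim_raises_max_inserts : Prop := (∀ (s : String), Dom_max_inserts s → Raises_max_inserts s → ¬ Pre_max_inserts s) ∧ (Dom_max_inserts (pvRaiseWitness_max_inserts) ∧ Raises_max_inserts (pvRaiseWitness_max_inserts) ∧ max_inserts_alt (pvRaiseWitness_max_inserts) = pvRaiseWitnessOut_max_inserts)

-- ===== LEMMAS AND PROOFS =====

def pvSumLen (gs : List (Char × Nat)) : Nat := (gs.map Prod.snd).sum
def pvSumA (gs : List (Char × Nat)) : Nat := ((gs.filter (fun p => p.1 == 'a')).map Prod.snd).sum
def pvHasRun3 (gs : List (Char × Nat)) : Bool := gs.any (fun p => p.1 == 'a' && decide (3 ≤ p.2))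

lemma pvLoopA_eval (s : String) (e : Char)
    (he : (PySem.Str.pyGet? s (-1)).getD 'a' = e) :
    ∀ (gs : List (Char × Nat)) (ans : Int) (last : Char),
      (last = 'a' → (gs.map Prod.fst).head? ≠ some 'a') →
      List.IsChain (· ≠ ·) (gs.map Prod.fst) →
      (gs.map Prod.fst).getLastD last = e →
      pvLoopA s gs ans last =
        if pvHasRun3 gs then -1
        else ans + 2 * (pvSumLen gs : Int) - 3 * (pvSumA gs : Int) + 2
               - (if last = 'a' then 2 else 0) := by
  intro gs
  induction gs with
  | nil =>
      intro ans last h1 h2 h3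
      simp only [List.map_nil, List.getLastD_nil] at h3
      subst h3
      simp only [pvLoopA]
      rw [he]
      simp only [pvHasRun3, pvSumLen, pvSumA, List.any_nil, List.map_nil,
        List.filter_nil, List.sum_nil, Nat.cast_zero]
      norm_num
      split_ifs <;> simp_all <;> ring
  | cons p gs ih =>
      obtain ⟨c, L⟩ := p
      intro ans last h1 h2 h3
      simp only [List.map_cons, List.head?_cons] at h1
      rw [List.map_cons, List.isChain_cons] at h2
      obtain ⟨hhd, hch⟩ := h2
      rw [List.map_cons, List.getLastD_cons] at h3
      by_cases hc : c = 'a'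
      · subst hc
        have hlast : last ≠ 'a' := fun hl => (h1 hl) rfl
        by_cases hL : (L : Int) < 3
        · have hL3 : ¬ 3 ≤ L := by exact_mod_cast fun h => absurd hL (by push_cast; omega)
          rw [pvLoopA, if_pos rfl, if_pos hL]
          rw [ih _ _ (fun _ hs => (hhd _ hs) rfl) hch h3]
          have hd : (decide (3 ≤ L)) = false := decide_eq_false hL3
          simp only [pvHasRun3, List.any_cons, pvSumLen, pvSumA, List.map_cons,
            List.sum_cons, List.filter_cons, beq_self_eq_true, Bool.true_and, hd,
            Bool.false_or, eq_self_iff_true, if_true]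
          split_ifs with h
          · rfl
          · push_cast
            ring
        · have hL3 : (3 : Nat) ≤ L := by omega
          rw [pvLoopA, if_pos rfl, if_neg hL]
          simp [pvHasRun3, hL3]
      · rw [pvLoopA, if_neg hc]
        rw [ih _ _ (fun hca => absurd hca hc) hch h3]
        have hcb : (c == 'a') = false := by simp [hc]
        simp only [pvHasRun3, List.any_cons, pvSumLen, pvSumA, List.map_cons,
          List.sum_cons, List.filter_cons, hcb, Bool.false_and, Bool.false_or,
          Bool.false_eq_true, if_false]
        split_ifs <;>
          first
            | rfl
            | (exact absurd (by assumption) hc)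
            | (push_cast; ring)

lemma pvRuns_head (l : List Char) : ((pvRuns l).map Prod.fst).head? = l.head? := by
  cases l with
  | nil => simp [pvRuns]
  | cons c cs => rw [pvRuns]; rfl

lemma pvRuns_chain (l : List Char) : List.IsChain (· ≠ ·) ((pvRuns l).map Prod.fst) := by
  induction l using pvRuns.induct with
  | case1 => simp [pvRuns]
  | case2 c cs ih =>
      rw [pvRuns, List.map_cons, List.isChain_cons]
      refine ⟨?_, ih⟩
      intro y hy
      rw [pvRuns_head, Option.mem_def] at hy
      have hnot := List.head?_dropWhile_not (fun x => x == c) cs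
      rw [hy] at hnot
      simp only [beq_eq_false_iff_ne, ne_eq] at hnot
      exact fun hcy => hnot (by simpa using hcy.symm)

lemma pvRuns_sumLen (l : List Char) : pvSumLen (pvRuns l) = l.length := by
  induction l using pvRuns.induct with
  | case1 => simp [pvRuns, pvSumLen]
  | case2 c cs ih =>
      rw [pvRuns]
      simp only [pvSumLen, List.map_cons, List.sum_cons] at ih ⊢
      have hsplit := List.takeWhile_append_dropWhile (p := fun x => x == c) (l := cs)
      have hlen : (cs.takeWhile (fun x => x == c)).length
          + (cs.dropWhile (fun x => x == c)).length = cs.length := by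
        rw [← List.length_append, hsplit]
      simp only [List.length_cons]
      omega

lemma pvRuns_sumA (l : List Char) : pvSumA (pvRuns l) = l.count 'a' := by
  induction l using pvRuns.induct with
  | case1 => simp [pvRuns, pvSumA]
  | case2 c cs ih =>
      rw [pvRuns]
      have hsplit := List.takeWhile_append_dropWhile (p := fun x => x == c) (l := cs)
      have hcount : cs.count 'a' = (cs.takeWhile (fun x => x == c)).count 'a'
          + (cs.dropWhile (fun x => x == c)).count 'a' := by
        rw [← List.count_append, hsplit]
      have hmem : ∀ y ∈ cs.takeWhile (fun x => x == c), y = c := by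
        intro y hy; simpa using List.mem_takeWhile_imp hy
      by_cases hc : c = 'a'
      · subst hc
        have ht : (cs.takeWhile (fun x => x == 'a')).count 'a'
            = (cs.takeWhile (fun x => x == 'a')).length :=
          List.count_eq_length.mpr (fun y hy => ((hmem y hy) ▸ rfl : ('a' : Char) = y))
        simp only [pvSumA] at ih
        simp [pvSumA, List.filter_cons, List.count_cons, ih, hcount, ht]
        omega
      · have hcb : (c == 'a') = false := by simp [hc]
        have ht0 : (cs.takeWhile (fun x => x == c)).count 'a' = 0 :=
          List.count_eq_zero.mpr (fun hmem' => hc ((hmem _ hmem')).symm)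
        simp only [pvSumA] at ih
        simp [pvSumA, List.filter_cons, hcb, List.count_cons, ih, hcount, ht0, hc]

lemma pvAllEq_getLastD (c : Char) (u : List Char) (hu : ∀ y ∈ u, y = c) :
    u.getLastD c = c := by
  induction u with
  | nil => rfl
  | cons a us ihu =>
      have ha : a = c := hu a (by simp)
      rw [List.getLastD_cons, ha]
      exact ihu (fun y hy => hu y (by simp [hy]))

lemma pvRuns_getLastD (l : List Char) (x : Char) :
    ((pvRuns l).map Prod.fst).getLastD x = l.getLastD x := by
  induction l using pvRuns.induct generalizing x with
  | case1 => simp [pvRuns]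
  | case2 c cs ih =>
      rw [pvRuns, List.map_cons, List.getLastD_cons, List.getLastD_cons]
      rw [ih c]
      have hsplit := List.takeWhile_append_dropWhile (p := fun x => x == c) (l := cs)
      have hmem : ∀ y ∈ cs.takeWhile (fun x => x == c), y = c := by
        intro y hy; simpa using List.mem_takeWhile_imp hy
      by_cases hd : cs.dropWhile (fun x => x == c) = []
      · rw [hd, List.getLastD_nil]
        rw [hd, List.append_nil] at hsplit
        conv_rhs => rw [← hsplit]
        exact (pvAllEq_getLastD c _ hmem).symm
      · conv_rhs => rw [← hsplit]
        rw [List.getLastD_eq_getLast?, List.getLastD_eq_getLast?,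
          List.getLast?_append_of_ne_nil _ hd]

lemma pvPrefix_aa (c : Char) (d : List Char) (hd : ∀ y ∈ d.head?, ¬ y = c) (hc : c = 'a') :
    ∀ m : Nat, (['a', 'a'] <+: List.replicate m c ++ d) ↔ 2 ≤ m := by
  subst hc
  intro m
  match m with
  | 0 =>
      simp only [List.replicate_zero, List.nil_append]
      constructor
      · intro hp
        exfalso
        cases d with
        | nil => simp at hp
        | cons y t => exact hd y rfl (List.cons_prefix_cons.mp hp).1.symm
      · omega
  | 1 =>
      simp only [List.replicate_one, List.singleton_append]
      constructor
      · intro hp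
        exfalso
        obtain ⟨_, hp2⟩ := List.cons_prefix_cons.mp hp
        cases d with
        | nil => simp at hp2
        | cons y t => exact hd y rfl (List.cons_prefix_cons.mp hp2).1.symm
      · omega
  | (m + 2) =>
      constructor
      · intro _; omega
      · intro _
        simp [List.replicate_succ, List.cons_prefix_cons]

lemma pvInfix_replicate (c : Char) (d : List Char) (hd : ∀ y ∈ d.head?, ¬ y = c) :
    ∀ m : Nat, (['a', 'a', 'a'] <:+: List.replicate m c ++ d)
      ↔ (c = 'a' ∧ 3 ≤ m) ∨ ['a', 'a', 'a'] <:+: d := by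
  intro m
  induction m with
  | zero => simp
  | succ m ih =>
      rw [List.replicate_succ, List.cons_append, List.infix_cons_iff]
      have hpref : (['a', 'a', 'a'] <+: c :: (List.replicate m c ++ d)) ↔ (c = 'a' ∧ 2 ≤ m) := by
        rw [List.cons_prefix_cons]
        constructor
        · rintro ⟨h1, h2⟩
          exact ⟨h1.symm, (pvPrefix_aa c d hd h1.symm m).mp h2⟩
        · rintro ⟨h1, h2⟩
          exact ⟨h1.symm, (pvPrefix_aa c d hd h1 m).mpr h2⟩
      rw [hpref, ih]
      constructor
      · rintro (⟨h1, h2⟩ | ⟨h1, h2⟩ | h)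
        · exact Or.inl ⟨h1, by omega⟩
        · exact Or.inl ⟨h1, by omega⟩
        · exact Or.inr h
      · rintro (⟨h1, h2⟩ | h)
        · by_cases hm : 2 ≤ m
          · exact Or.inl ⟨h1, hm⟩
          · exact Or.inr (Or.inl ⟨h1, by omega⟩)
        · exact Or.inr (Or.inr h)

lemma pvRuns_run3 (l : List Char) :
    pvHasRun3 (pvRuns l) = true ↔ ['a', 'a', 'a'] <:+: l := by
  induction l using pvRuns.induct with
  | case1 => simp [pvRuns, pvHasRun3]
  | case2 c cs ih =>
      rw [pvRuns]
      have hsplit := List.takeWhile_append_dropWhile (p := fun x => x == c) (l := cs)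
      have hmem : ∀ y ∈ cs.takeWhile (fun x => x == c), y = c := by
        intro y hy; simpa using List.mem_takeWhile_imp hy
      have hrep : cs.takeWhile (fun x => x == c)
          = List.replicate (cs.takeWhile (fun x => x == c)).length c :=
        List.eq_replicate_of_mem hmem
      have hd : ∀ y ∈ (cs.dropWhile (fun x => x == c)).head?, ¬ y = c := by
        intro y hy
        have hnot := List.head?_dropWhile_not (fun x => x == c) cs
        rw [Option.mem_def] at hy
        rw [hy] at hnot
        simpa using hnot
      have hl : c :: cs
          = List.replicate ((cs.takeWhile (fun x => x == c)).length + 1) c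
              ++ cs.dropWhile (fun x => x == c) := by
        rw [List.replicate_succ, List.cons_append, ← hrep, hsplit]
      rw [hl, pvInfix_replicate c _ hd]
      have hcons : ∀ (p : Char × Nat) (gs : List (Char × Nat)),
          pvHasRun3 (p :: gs) = ((p.1 == 'a' && decide (3 ≤ p.2)) || pvHasRun3 gs) :=
        fun p gs => rfl
      simp only [hcons, Bool.or_eq_true, Bool.and_eq_true,
        beq_iff_eq, decide_eq_true_eq, ih]
      constructor
      · rintro (⟨h1, h2⟩ | h)
        · exact Or.inl ⟨h1, by omega⟩
        · exact Or.inr h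
      · rintro (⟨h1, h2⟩ | h)
        · exact Or.inl ⟨h1, by omega⟩
        · exact Or.inr h

lemma pvCount_go_single (c : Char) :
    ∀ (l : List Char) (fuel : Nat) (acc : Nat), l.length ≤ fuel →
      PySem.Chars.count.go [c] fuel l acc = acc + l.count c := by
  intro l
  induction l with
  | nil =>
      intro fuel acc _
      cases fuel <;> simp [PySem.Chars.count.go]
  | cons x t ih =>
      intro fuel acc h
      cases fuel with
      | zero => simp at h
      | succ f =>
          have hf : t.length ≤ f := by simpa using h
          by_cases hx : c = x
          · subst hx
            rw [PySem.Chars.count.go]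
            simp only [List.isPrefixOf, beq_self_eq_true, Bool.true_and,
              List.isPrefixOf_nil_left, if_true, List.length_singleton, List.drop_one,
              List.tail_cons]
            rw [ih f (acc + 1) hf]
            simp [List.count_cons]
            omega
          · have hxb : (c == x) = false := by simp [hx]
            rw [PySem.Chars.count.go]
            simp only [List.isPrefixOf, hxb, Bool.false_and, Bool.false_eq_true, if_false]
            rw [ih f acc hf]
            simp [List.count_cons, hxb]
            exact fun h' => hx h'.symm

lemma pvCount_single (l : List Char) (c : Char) :
    PySem.Chars.count l [c] = l.count c := by
  rw [PySem.Chars.count]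
  simp only [List.isEmpty_cons, if_false, Bool.false_eq_true]
  exact (pvCount_go_single c l l.length 0 le_rfl).trans (by omega)

lemma pvLast_char (s : String) (h : s.toList ≠ []) :
    (PySem.Str.pyGet? s (-1)).getD 'a' = s.toList.getLastD '#' := by
  have hn : 1 ≤ s.length := by
    rw [← String.length_toList]; exact List.length_pos_iff.mpr h
  have hlt : s.length - 1 < s.toList.length := by rw [String.length_toList]; omega
  simp [PySem.Str.pyGet?, PySem.Chars.pyGet?, PySem.List.pyGet?, PySem.List.pyIdx?, hn,
    List.getLastD_eq_getLast?, List.getLast?_eq_getElem?, String.length_toList,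
    List.getElem?_eq_getElem hlt]

-- ===== VERDICT (by name: the statement is the Claim_ definition above) =====
theorem max_inserts_spec : Claim_equal_max_inserts := by
  intro s _ hpre
  unfold Spec_max_inserts
  have hl : s.toList ≠ [] := by
    intro h0
    exact hpre (by simpa [String.toList_eq_nil_iff] using h0)
  have he := pvLast_char s hl
  unfold max_inserts max_inserts_alt
  rw [pvLoopA_eval s (s.toList.getLastD '#') he (pvRuns s.toList) 0 '#'
      (fun h => absurd h (by decide)) (pvRuns_chain _) (pvRuns_getLastD _ '#')]
  rw [pvRuns_sumLen, pvRuns_sumA]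
  have hiff : PySem.Str.isIn "aaa" s = pvHasRun3 (pvRuns s.toList) := by
    have h1 := PySem.Str.isIn_iff_infix (sub := "aaa") (s := s)
    rw [show "aaa".toList = ['a', 'a', 'a'] from rfl] at h1
    exact Bool.eq_iff_iff.mpr (h1.trans (pvRuns_run3 _).symm)
  rw [hiff]
  have hcnt : (PySem.Str.count s "a" : Int) = (s.toList.count 'a' : Int) := by
    have : PySem.Str.count s "a" = PySem.Chars.count s.toList ['a'] := by simp
    rw [this, pvCount_single]
  have hlen : (PySem.Str.len s : Int) = (s.toList.length : Int) := by
    have : PySem.Str.len s = s.toList.length := by simp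
    rw [this]
  rw [hcnt, hlen]
  split_ifs with h h2
  · rfl
  · exact absurd h2 (by decide)
  · ring

@[simp] theorem max_inserts_raises : Claim_raises_max_inserts := by
  unfold Claim_raises_max_inserts
  exact ⟨fun s _ hr hp => hp hr, by decide⟩
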